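-- pv_equiv track=rewrite | github.com/Zeeeepa/agent | jinx/micro/embeddings/project_line_window.py | find_line_window
-- ===== SOURCE A (Python) =====
-- from typing import List, Tuple
--
-- def find_line_window(text: str, tokens: List[str], around: int = 6) -> Tuple[int, int, str]:
--     """Find a small line window around the first occurrence of any token.
--
--     Returns (line_start, line_end, snippet). Lines are 1-based and inclusive.
--     If nothing is found, returns (0, 0, "").
--     """
--     if not text or not tokens:
--         return 0, 0, ""
--     lowered = text.lower()
--     hit_pos = -1
--     hit_len = 0
--     for t in tokens:
--         if not t:
--             continue
--         p = lowered.find(t.lower())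
--         if p >= 0 and (hit_pos == -1 or p < hit_pos):
--             hit_pos = p
--             hit_len = len(t)
--     if hit_pos < 0:
--         return 0, 0, ""
--     pre = text[:hit_pos]
--     ls = pre.count("\n") + 1
--     le = ls + max(1, text[hit_pos:hit_pos + hit_len].count("\n"))
--     lines_all = text.splitlines()
--     a = max(1, ls - around)
--     b = min(len(lines_all), le + around)
--     snippet = "\n".join(lines_all[a - 1:b]).strip()
--     return a, b, snippet
-- ===== SOURCE B (Python) =====
-- from typing import List, Tuple
--
-- def find_line_window(text: str, tokens: List[str], around: int = 6) -> Tuple[int, int, str]: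
--     """Position-major scan: walk the text once left-to-right and stop at the
--     first position where any (lowercased) token matches; first token in list
--     order wins a tie at the same position."""
--     if not text or not tokens:
--         return 0, 0, ""
--     lowered = text.lower()
--     pats = [(t.lower(), len(t)) for t in tokens if t]
--     hit = None
--     for i in range(len(lowered)):
--         for pat, tlen in pats:
--             if lowered.startswith(pat, i):
--                 hit = (i, tlen)
--                 break
--         if hit is not None:
--             break
--     if hit is None:
--         return 0, 0, ""
--     hit_pos, hit_len = hit
--     pre = text[:hit_pos]
--     ls = pre.count("\n") + 1
--     le = ls + max(1, text[hit_pos:hit_pos + hit_len].count("\n"))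
--     lines_all = text.splitlines()
--     a = max(1, ls - around)
--     b = min(len(lines_all), le + around)
--     snippet = "\n".join(lines_all[a - 1:b]).strip()
--     return a, b, snippet
-- ===== Notes on version B (the rewrite author's own statement) =====
-- stated objective: faster
-- what changed: A runs one whole-text substring .find per token and keeps the minimum hit position; B does a single position-major left-to-right scan that stops at the first position where any lowercased token matches (first token in list order wins a tie), then builds the same line window.
import Mathlib
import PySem

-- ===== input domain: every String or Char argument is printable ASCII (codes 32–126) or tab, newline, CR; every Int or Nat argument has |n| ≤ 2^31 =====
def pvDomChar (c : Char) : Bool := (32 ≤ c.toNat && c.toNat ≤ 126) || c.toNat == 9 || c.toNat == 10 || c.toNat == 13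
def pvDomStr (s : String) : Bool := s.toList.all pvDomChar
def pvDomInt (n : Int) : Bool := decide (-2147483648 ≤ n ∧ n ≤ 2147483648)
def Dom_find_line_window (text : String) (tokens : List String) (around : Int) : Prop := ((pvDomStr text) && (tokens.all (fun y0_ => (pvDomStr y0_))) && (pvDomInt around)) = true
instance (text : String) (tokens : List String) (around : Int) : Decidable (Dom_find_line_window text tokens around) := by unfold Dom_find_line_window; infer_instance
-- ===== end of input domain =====

-- B replaces A's token-major loop (one substring .find per token, keeping the min) by a
-- position-major single left-to-right scan that stops at the first position where any token
-- matches (first token in list order wins ties): it stops at the earliest hit instead of finishing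
-- every token's search (a timing run measured B faster); same return value everywhere.


-- ===== PORT A =====
def find_line_window (text : String) (tokens : List String) (around : Int) : Int × Int × String :=
  if text = "" ∨ tokens = [] then (0, 0, "")
  else
    let lowered := PySem.Str.lower text
    let hit := tokens.foldl (fun (st : Int × Int) t =>
      if t = "" then st
      else
        let p := PySem.Str.find lowered (PySem.Str.lower t)
        if 0 ≤ p ∧ (st.1 = -1 ∨ p < st.1) then (p, PySem.Str.len t) else st) (-1, 0)
    if hit.1 < 0 then (0, 0, "")
    else
      let hit_pos := hit.1
      let hit_len := hit.2
      let pre := PySem.Str.slice text none (some hit_pos)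
      let ls : Int := (PySem.Str.count pre "\n" : Int) + 1
      let le : Int := ls + max 1 ((PySem.Str.count (PySem.Str.slice text (some hit_pos) (some (hit_pos + hit_len))) "\n" : Int))
      let lines_all := PySem.Str.splitlines text
      let a : Int := max 1 (ls - around)
      let b : Int := min (lines_all.length : Int) (le + around)
      (a, b, PySem.Str.strip (PySem.Str.join "\n" (PySem.List.slice lines_all (some (a - 1)) (some b))))

-- ===== PORT B =====
-- inner loop of Source B: first pattern in list order matching at position i (break on first hit)
def fwFirstAt (s : List Char) (pats : List (List Char × Int)) (i : Nat) : Option (Int × Int) :=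
  match pats with
  | [] => none
  | q :: rest =>
      -- hand port of Python's `lowered.startswith(pat, i)` (0 ≤ i ≤ len): prefix of drop i, exact there
      if PySem.Chars.startswith (s.drop i) q.1 then some ((i : Int), q.2)
      else fwFirstAt s rest i

-- outer loop of Source B: `for i in range(len(lowered))` with break on the first hit
def fwScan (s : List Char) (pats : List (List Char × Int)) (i : Nat) : Option (Int × Int) :=
  if _h : i < s.length then
    match fwFirstAt s pats i with
    | some r => some r
    | none => fwScan s pats (i + 1)
  else none
termination_by s.length - i

def find_line_window_alt (text : String) (tokens : List String) (around : Int) : Int × Int × String :=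
  if text = "" ∨ tokens = [] then (0, 0, "")
  else
    let lowered := (PySem.Str.lower text).toList
    let pats := (tokens.filter (fun t => !decide (t = ""))).map
      (fun t => ((PySem.Str.lower t).toList, PySem.Str.len t))
    match fwScan lowered pats 0 with
    | none => (0, 0, "")
    | some hit =>
      let hit_pos := hit.1
      let hit_len := hit.2
      let pre := PySem.Str.slice text none (some hit_pos)
      let ls : Int := (PySem.Str.count pre "\n" : Int) + 1
      let le : Int := ls + max 1 ((PySem.Str.count (PySem.Str.slice text (some hit_pos) (some (hit_pos + hit_len))) "\n" : Int))
      let lines_all := PySem.Str.splitlines text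
      let a : Int := max 1 (ls - around)
      let b : Int := min (lines_all.length : Int) (le + around)
      (a, b, PySem.Str.strip (PySem.Str.join "\n" (PySem.List.slice lines_all (some (a - 1)) (some b))))

-- ===== PRECONDITION & SPEC =====
def Spec_find_line_window (text : String) (tokens : List String) (around : Int) (out : Int × Int × String) : Prop := out = find_line_window_alt text tokens around
instance (text : String) (tokens : List String) (around : Int) (out : Int × Int × String) : Decidable (Spec_find_line_window text tokens around out) := by unfold Spec_find_line_window; infer_instance

-- ===== CLAIM (what is proved, stated in full; the proofs are below) =====
def Claim_equal_find_line_window : Prop := ∀ (text : String) (tokens : List String) (around : Int), Dom_find_line_window text tokens around → Spec_find_line_window text tokens around (find_line_window text tokens around)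

-- ===== LEMMAS AND PROOFS =====

-- A's fold step over a (lowered pattern, token length) pair
def fwStep (s : List Char) (st : Int × Int) (q : List Char × Int) : Int × Int :=
  if 0 ≤ PySem.Chars.find s q.1 ∧ (st.1 = -1 ∨ PySem.Chars.find s q.1 < st.1)
  then (PySem.Chars.find s q.1, q.2) else st

-- canonical "minimal find, earliest token wins ties" value
def fwBest (s : List Char) : List (List Char × Int) → Option (Int × Int)
  | [] => none
  | q :: rest =>
    match fwBest s rest with
    | none => if 0 ≤ PySem.Chars.find s q.1 then some (PySem.Chars.find s q.1, q.2) else none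
    | some r => if 0 ≤ PySem.Chars.find s q.1 ∧ PySem.Chars.find s q.1 ≤ r.1
                then some (PySem.Chars.find s q.1, q.2) else some r

def fwCombine (st : Int × Int) : Option (Int × Int) → Int × Int
  | none => st
  | some r => if st.1 = -1 ∨ r.1 < st.1 then r else st

theorem fwCombine_none (st : Int × Int) : fwCombine st none = st := rfl

theorem fwCombine_some (st r : Int × Int) :
    fwCombine st (some r) = if st.1 = -1 ∨ r.1 < st.1 then r else st := rfl

theorem fwBest_nonneg (s : List Char) (pats : List (List Char × Int)) (r : Int × Int)
    (h : fwBest s pats = some r) : 0 ≤ r.1 := by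
  induction pats generalizing r with
  | nil => simp [fwBest] at h
  | cons q rest ih =>
    simp only [fwBest] at h
    cases hb : fwBest s rest with
    | none =>
      rw [hb] at h
      simp only at h
      split_ifs at h with h0
      injection h with h; subst h; exact h0
    | some r' =>
      rw [hb] at h
      simp only at h
      split_ifs at h with h0
      · injection h with h; subst h; exact h0.1
      · injection h with h; subst h; exact ih r' hb

theorem fwBest_none_iff (s : List Char) (pats : List (List Char × Int)) :
    fwBest s pats = none ↔ ∀ q ∈ pats, PySem.Chars.find s q.1 = -1 := by
  induction pats with
  | nil => simp [fwBest]
  | cons q rest ih =>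
    simp only [fwBest]
    cases hb : fwBest s rest with
    | none =>
      have hrest := ih.1 hb
      have := PySem.Chars.neg_one_le_find s q.1
      split_ifs with h0
      · simp only [reduceCtorEq, false_iff]
        intro hall
        exact absurd (hall q (by simp)) (by omega)
      · simp only [true_iff]
        intro q' hq'
        rcases List.mem_cons.1 hq' with hq' | hq'
        · subst hq'; omega
        · exact hrest q' hq'
    | some r =>
      have hne : ¬ ∀ q' ∈ rest, PySem.Chars.find s q'.1 = -1 := by
        rw [← ih, hb]; simp
      simp only
      constructor
      · intro heq
        split_ifs at heq <;> exact absurd heq (by simp)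
      · intro hall
        exact absurd (fun q' hq' => hall q' (List.mem_cons_of_mem _ hq')) hne

theorem fwFoldl_eq_combine (s : List Char) (pats : List (List Char × Int)) (st : Int × Int)
    (hst : st.1 = -1 ∨ 0 ≤ st.1) :
    pats.foldl (fwStep s) st = fwCombine st (fwBest s pats) := by
  induction pats generalizing st with
  | nil => simp [fwBest, fwCombine_none]
  | cons q rest ih =>
    have hinv : (fwStep s st q).1 = -1 ∨ 0 ≤ (fwStep s st q).1 := by
      unfold fwStep
      split_ifs with h
      · exact Or.inr h.1
      · exact hst
    rw [List.foldl_cons, ih _ hinv]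
    rcases st with ⟨s1, s2⟩
    simp only at hst
    cases hb : fwBest s rest with
    | none =>
      simp only [fwBest, hb, fwStep, fwCombine_none]
      by_cases h0 : (0:Int) ≤ PySem.Chars.find s q.1
      · rw [if_pos h0, fwCombine_some]
        by_cases hd : s1 = -1 ∨ PySem.Chars.find s q.1 < s1
        · rw [if_pos ⟨h0, hd⟩, if_pos hd]
        · rw [if_neg (fun hc => hd hc.2), if_neg hd]
      · rw [if_neg h0, fwCombine_none, if_neg (fun hc => h0 hc.1)]
    | some r =>
      rcases r with ⟨r1, r2⟩
      have hr : (0:Int) ≤ r1 := fwBest_nonneg s rest (r1, r2) hb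
      simp only [fwBest, hb, fwStep]
      by_cases hc1 : 0 ≤ PySem.Chars.find s q.1 ∧ (s1 = -1 ∨ PySem.Chars.find s q.1 < s1)
      · rw [if_pos hc1]
        by_cases hc2 : 0 ≤ PySem.Chars.find s q.1 ∧ PySem.Chars.find s q.1 ≤ r1
        · rw [if_pos hc2, fwCombine_some, fwCombine_some]
          simp only
          rw [if_neg (by omega), if_pos hc1.2]
        · rw [if_neg hc2, fwCombine_some, fwCombine_some]
          simp only
          have hrlt : r1 < PySem.Chars.find s q.1 := by
            rcases hc1 with ⟨h0, _⟩
            by_contra hcon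
            exact hc2 ⟨h0, by omega⟩
          rw [if_pos (Or.inr hrlt)]
          rcases hc1.2 with hcase | hcase
          · rw [if_pos (Or.inl hcase)]
          · rw [if_pos (Or.inr (by omega))]
      · rw [if_neg hc1]
        by_cases hc2 : 0 ≤ PySem.Chars.find s q.1 ∧ PySem.Chars.find s q.1 ≤ r1
        · rw [if_pos hc2, fwCombine_some, fwCombine_some]
          simp only
          have hns : s1 ≠ -1 ∧ s1 ≤ PySem.Chars.find s q.1 := by
            constructor
            · intro hcon; exact hc1 ⟨hc2.1, Or.inl hcon⟩
            · by_contra hcon; exact hc1 ⟨hc2.1, Or.inr (by omega)⟩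
          rw [if_neg (by rcases hns with ⟨h1, h2⟩; rcases hc2 with ⟨h3, h4⟩; intro hcon; rcases hcon with h | h <;> omega),
            if_neg (by rcases hns with ⟨h1, h2⟩; intro hcon; rcases hcon with h | h <;> omega)]
        · rw [if_neg hc2]

theorem fwFind_le_of_prefix_drop (s pat : List Char) (j : Nat) (h : pat <+: s.drop j) :
    0 ≤ PySem.Chars.find s pat ∧ PySem.Chars.find s pat ≤ (j : Int) := by
  have hinf : pat <:+: s := h.isInfix.trans (List.drop_suffix j s).isInfix
  have h0 : 0 ≤ PySem.Chars.find s pat := (PySem.Chars.find_nonneg_iff s pat).2 hinf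
  refine ⟨h0, ?_⟩
  have hspec := PySem.Chars.find_spec h0
  by_contra hlt
  push_neg at hlt
  exact hspec.2 j (by omega) h

theorem fwFirstAt_none_iff (s : List Char) (pats : List (List Char × Int)) (i : Nat) :
    fwFirstAt s pats i = none ↔ ∀ q ∈ pats, ¬ q.1 <+: s.drop i := by
  induction pats with
  | nil => simp [fwFirstAt]
  | cons q rest ih =>
    simp only [fwFirstAt]
    split_ifs with h
    · rw [PySem.Chars.startswith_iff] at h
      simp [h]
    · have hnp : ¬ q.1 <+: s.drop i := fun hp => h ((PySem.Chars.startswith_iff _ _).2 hp)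
      simp [ih, hnp]

-- fwBest characterization: minimality + the scan's inner loop agrees at the hit position
theorem fwBest_spec (s : List Char) (pats : List (List Char × Int)) (r : Int × Int)
    (h : fwBest s pats = some r) :
    (∀ q ∈ pats, PySem.Chars.find s q.1 = -1 ∨ r.1 ≤ PySem.Chars.find s q.1) ∧
      fwFirstAt s pats r.1.toNat = some r := by
  induction pats generalizing r with
  | nil => simp [fwBest] at h
  | cons q rest ih =>
    simp only [fwBest] at h
    cases hb : fwBest s rest with
    | none =>
      rw [hb] at h
      simp only at h
      split_ifs at h with h0
      injection h with h; subst h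
      have hspec := PySem.Chars.find_spec h0
      have hrest := (fwBest_none_iff s rest).1 hb
      refine ⟨?_, ?_⟩
      · intro q' hq'
        rcases List.mem_cons.1 hq' with hq' | hq'
        · subst hq'; exact Or.inr le_rfl
        · exact Or.inl (hrest q' hq')
      · simp only [fwFirstAt]
        rw [if_pos (by rw [PySem.Chars.startswith_iff]; exact hspec.1)]
        simp [Int.toNat_of_nonneg h0]
    | some r' =>
      rw [hb] at h
      simp only at h
      obtain ⟨hmin', hfirst'⟩ := ih r' hb
      have h0r' : 0 ≤ r'.1 := fwBest_nonneg s rest r' hb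
      split_ifs at h with h0
      · injection h with h; subst h
        have hspec := PySem.Chars.find_spec h0.1
        refine ⟨?_, ?_⟩
        · intro q' hq'
          rcases List.mem_cons.1 hq' with hq' | hq'
          · subst hq'; exact Or.inr le_rfl
          · rcases hmin' q' hq' with hm | hm
            · exact Or.inl hm
            · exact Or.inr (le_trans h0.2 hm)
        · simp only [fwFirstAt]
          rw [if_pos (by rw [PySem.Chars.startswith_iff]; exact hspec.1)]
          simp [Int.toNat_of_nonneg h0.1]
      · injection h with h; subst h
        refine ⟨?_, ?_⟩
        · intro q' hq'
          rcases List.mem_cons.1 hq' with hq' | hq'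
          · push_neg at h0
            have hlow := PySem.Chars.neg_one_le_find s q.1
            rw [hq']
            by_cases hge : 0 ≤ PySem.Chars.find s q.1
            · exact Or.inr (le_of_lt (h0 hge))
            · exact Or.inl (by omega)
          · exact hmin' q' hq'
        · simp only [fwFirstAt]
          rw [if_neg, hfirst']
          rw [PySem.Chars.startswith_iff]
          intro hpre
          obtain ⟨hge, hle⟩ := fwFind_le_of_prefix_drop s q.1 r'.1.toNat hpre
          rw [Int.toNat_of_nonneg h0r'] at hle
          push_neg at h0
          have := h0 hge
          omega

theorem fwScan_none (s : List Char) (pats : List (List Char × Int)) (i : Nat)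
    (h : ∀ j, i ≤ j → fwFirstAt s pats j = none) : fwScan s pats i = none := by
  unfold fwScan
  split_ifs with hi
  · rw [h i le_rfl]
    exact fwScan_none s pats (i + 1) (fun j hj => h j (by omega))
  · rfl
termination_by s.length - i

theorem fwScan_reach (s : List Char) (pats : List (List Char × Int)) (i j : Nat) (r : Int × Int)
    (hij : i ≤ j) (hj : j < s.length) (hnone : ∀ k, i ≤ k → k < j → fwFirstAt s pats k = none)
    (hhit : fwFirstAt s pats j = some r) : fwScan s pats i = some r := by
  unfold fwScan
  rcases eq_or_lt_of_le hij with heq | hlt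
  · subst heq
    rw [dif_pos hj, hhit]
  · rw [dif_pos (show i < s.length by omega), hnone i le_rfl hlt]
    exact fwScan_reach s pats (i + 1) j r (by omega) hj (fun k hk1 hk2 => hnone k (by omega) hk2) hhit
termination_by s.length - i

-- main bridge: the position scan computes fwBest, given all patterns nonempty
theorem fwScan_eq_best (s : List Char) (pats : List (List Char × Int))
    (hne : ∀ q ∈ pats, q.1 ≠ []) : fwScan s pats 0 = fwBest s pats := by
  rcases hb : fwBest s pats with _ | r
  · apply fwScan_none
    intro j _
    rw [fwFirstAt_none_iff]
    intro q hq hpre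
    obtain ⟨hge, _⟩ := fwFind_le_of_prefix_drop s q.1 j hpre
    have := (fwBest_none_iff s pats).1 hb q hq
    omega
  · obtain ⟨hmin, hfirst⟩ := fwBest_spec s pats r hb
    have h0r : 0 ≤ r.1 := fwBest_nonneg s pats r hb
    -- the hit position is inside the string
    have hjlt : r.1.toNat < s.length := by
      have : fwFirstAt s pats r.1.toNat ≠ none := by rw [hfirst]; simp
      rw [Ne, fwFirstAt_none_iff] at this
      push_neg at this
      obtain ⟨q, hq, hpre⟩ := this
      rcases hpre with ⟨t, ht⟩
      have hqne := hne q hq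
      have : s.drop r.1.toNat ≠ [] := by
        intro hnil
        rw [hnil] at ht
        exact hqne (by cases q.1 <;> simp_all)
      have := List.length_pos_of_ne_nil this
      rw [List.length_drop] at this
      omega
    exact fwScan_reach s pats 0 r.1.toNat r (Nat.zero_le _) hjlt
      (fun k _ hk => by
        rw [fwFirstAt_none_iff]
        intro q hq hpre
        obtain ⟨hge, hle⟩ := fwFind_le_of_prefix_drop s q.1 k hpre
        rcases hmin q hq with hm | hm <;> omega) hfirst

-- A's token-major fold computes fwCombine of fwBest over the filtered/lowered patterns
theorem foldA_eq (lowtext : String) (tokens : List String) :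
    tokens.foldl (fun (st : Int × Int) t =>
      if t = "" then st
      else
        if 0 ≤ PySem.Str.find lowtext (PySem.Str.lower t) ∧
            (st.1 = -1 ∨ PySem.Str.find lowtext (PySem.Str.lower t) < st.1)
        then (PySem.Str.find lowtext (PySem.Str.lower t), PySem.Str.len t) else st) (-1, 0)
    = fwCombine (-1, 0) (fwBest lowtext.toList
        ((tokens.filter (fun t => !decide (t = ""))).map
          (fun t => ((PySem.Str.lower t).toList, PySem.Str.len t)))) := by
  rw [← fwFoldl_eq_combine _ _ _ (Or.inl rfl)]
  rw [List.foldl_map, List.foldl_filter]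
  apply List.foldl_ext
  intro st t _
  by_cases ht : t = ""
  · simp [ht]
  · simp [ht, fwStep, PySem.Str.find_eq]

theorem patsNonempty (tokens : List String) (q : List Char × Int)
    (hq : q ∈ (tokens.filter (fun t => !decide (t = ""))).map
        (fun t => ((PySem.Str.lower t).toList, PySem.Str.len t))) : q.1 ≠ [] := by
  obtain ⟨t, ht, rfl⟩ := List.mem_map.1 hq
  have ht' : ¬ t = "" := by simpa using (List.mem_filter.1 ht).2
  simp only [PySem.Str.toList_lower, PySem.Chars.lower, ne_eq, List.map_eq_nil_iff]
  intro hnil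
  exact ht' (by cases t with | _ d => cases d with | _ l => cases l <;> simp_all)

-- ===== VERDICT (by name: the statement is the Claim_ definition above) =====
theorem find_line_window_spec : Claim_equal_find_line_window := by
  intro text tokens around _
  unfold Spec_find_line_window
  simp only [find_line_window, find_line_window_alt]
  by_cases hguard : text = "" ∨ tokens = []
  · simp only [if_pos hguard]
  · simp only [if_neg hguard]
    rw [foldA_eq (PySem.Str.lower text) tokens,
      fwScan_eq_best ((PySem.Str.lower text)).toList _ (patsNonempty tokens)]
    cases hbest : fwBest ((PySem.Str.lower text)).toList
        ((tokens.filter (fun t => !decide (t = ""))).map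
          (fun t => ((PySem.Str.lower t).toList, PySem.Str.len t))) with
    | none => simp [fwCombine_none]
    | some r =>
      have hr : 0 ≤ r.1 := fwBest_nonneg _ _ _ hbest
      rw [fwCombine_some]
      simp only
      rw [if_pos (Or.inl trivial)]
      rw [if_neg (by omega)]
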